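-- pv_equiv track=rewrite | github.com/elishevaUngar/pythonProject | Exercise1/Exercise1_list.py | countElementInRange
-- ===== SOURCE A (Python) =====
-- def countElementInRange(list, minR, maxR):
--     index = 0
--     counter = 0
--     for item in list:
--         if index >= minR and index <= maxR:
--             counter += 1
--         index += 1
--     return counter
-- ===== SOURCE B (Python) =====
-- def countElementInRange(list, minR, maxR):
--     n = len(list)
--     lo = max(0, minR)
--     hi = min(n - 1, maxR)
--     return max(0, hi - lo + 1)
-- ===== Notes on version B (the rewrite author's own statement) =====
-- stated objective: faster
-- what changed: Replaced the per-element loop that tests each index against the range with a closed-form intersection count max(0, min(n-1,maxR) - max(0,minR) + 1) using only len().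
import Mathlib
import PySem

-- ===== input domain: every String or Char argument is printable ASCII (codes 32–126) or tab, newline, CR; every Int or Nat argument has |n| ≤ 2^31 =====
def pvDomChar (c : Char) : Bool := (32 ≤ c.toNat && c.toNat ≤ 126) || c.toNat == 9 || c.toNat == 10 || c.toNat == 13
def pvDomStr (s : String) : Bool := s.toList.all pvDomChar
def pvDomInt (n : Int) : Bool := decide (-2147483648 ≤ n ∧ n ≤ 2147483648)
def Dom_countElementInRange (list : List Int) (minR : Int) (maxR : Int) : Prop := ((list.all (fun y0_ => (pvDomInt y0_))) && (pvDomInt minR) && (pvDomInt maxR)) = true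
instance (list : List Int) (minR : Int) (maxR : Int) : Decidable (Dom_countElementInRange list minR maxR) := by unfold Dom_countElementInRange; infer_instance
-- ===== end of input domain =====

-- B replaces A's per-index loop by the closed-form size of the intersection
-- of [0, n-1] with [minR, maxR]; objective: faster (O(1) vs O(n)).

-- ===== PORT A =====
-- A's for-loop over the list carrying (index, counter).
def countElementInRangeLoop : List Int → Int → Int → Int → Int → Int
  | [], _, counter, _, _ => counter
  | _ :: rest, index, counter, minR, maxR =>
    countElementInRangeLoop rest (index + 1)
      (if index ≥ minR ∧ index ≤ maxR then counter + 1 else counter) minR maxR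

def countElementInRange (list : List Int) (minR : Int) (maxR : Int) : Int :=
  countElementInRangeLoop list 0 0 minR maxR

-- ===== PORT B =====
def countElementInRange_alt (list : List Int) (minR : Int) (maxR : Int) : Int :=
  let n : Int := list.length
  let lo := max 0 minR
  let hi := min (n - 1) maxR
  max 0 (hi - lo + 1)

-- ===== PRECONDITION & SPEC =====
def Spec_countElementInRange (list : List Int) (minR : Int) (maxR : Int) (out : Int) : Prop := out = countElementInRange_alt list minR maxR
instance (list : List Int) (minR : Int) (maxR : Int) (out : Int) : Decidable (Spec_countElementInRange list minR maxR out) := by unfold Spec_countElementInRange; infer_instance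

-- ===== CLAIM (what is proved, stated in full; the proofs are below) =====
def Claim_equal_countElementInRange : Prop := ∀ (list : List Int) (minR : Int) (maxR : Int), Dom_countElementInRange list minR maxR → Spec_countElementInRange list minR maxR (countElementInRange list minR maxR)

-- ===== LEMMAS AND PROOFS =====

-- Loop invariant: from any start index, the loop adds the size of the
-- intersection of [index, index + len - 1] with [minR, maxR].
theorem countElementInRangeLoop_eq (list : List Int) :
    ∀ (index counter minR maxR : Int),
      countElementInRangeLoop list index counter minR maxR =
        counter + max 0 (min (index + list.length - 1) maxR - max index minR + 1) := by
  induction list with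
  | nil =>
    intro index counter minR maxR
    simp only [countElementInRangeLoop, List.length_nil, Int.natCast_zero]
    omega
  | cons x rest ih =>
    intro index counter minR maxR
    simp only [countElementInRangeLoop, ih, List.length_cons]
    split_ifs <;> push_cast <;> omega

-- ===== VERDICT (by name: the statement is the Claim_ definition above) =====
theorem countElementInRange_spec : Claim_equal_countElementInRange := by
  intro list minR maxR _
  simp only [Spec_countElementInRange, countElementInRange, countElementInRange_alt,
    countElementInRangeLoop_eq]
  omega
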